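-- pv_equiv track=rewrite | github.com/colinminini/RL_Tetris_Project | DQN_scripts/dqn_afterstate.py | build_action_sequences
-- ===== SOURCE A (Python) =====
-- def build_action_sequences(max_shift=10):
--     """Enumerate macro-actions: rotations + left/right shifts + hard drop."""
--     # Each sequence is a list of int action codes from the environment.
--     sequences = []
--     rotations = [[], [3], [3, 3], [3, 3, 3]]
--     for rot in rotations:
--         for k in range(max_shift + 1):
--             sequences.append(rot + [0] * k + [5])
--             sequences.append(rot + [1] * k + [5])
--     unique = []
--     seen = set()
--     for seq in sequences:
--         key = tuple(seq)
--         if key not in seen: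
--             seen.add(key)
--             unique.append(seq)
--     return unique
-- ===== SOURCE B (Python) =====
-- def build_action_sequences(max_shift=10):
--     """Enumerate macro-actions: rotations + left/right shifts + hard drop."""
--     # Build the distinct shift blocks once (k = 0 gives a single empty block,
--     # since shifting left or right zero times is the same), then combine with
--     # each rotation prefix; no dedup pass is needed.
--     shift_blocks = []
--     for k in range(max_shift + 1):
--         if k == 0:
--             shift_blocks.append([])
--         else:
--             shift_blocks.append([0] * k)
--             shift_blocks.append([1] * k)
--     return [rot + block + [5]
--             for rot in ([], [3], [3, 3], [3, 3, 3])
--             for block in shift_blocks]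
-- ===== Notes on version B (the rewrite author's own statement) =====
-- stated objective: simpler
-- what changed: B precomputes the distinct shift blocks once (emitting a single empty block for k=0 instead of two equal left/right sequences) and combines them with each rotation prefix in one comprehension, removing A's duplicate generation and the whole seen-set dedup pass.
import Mathlib
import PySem

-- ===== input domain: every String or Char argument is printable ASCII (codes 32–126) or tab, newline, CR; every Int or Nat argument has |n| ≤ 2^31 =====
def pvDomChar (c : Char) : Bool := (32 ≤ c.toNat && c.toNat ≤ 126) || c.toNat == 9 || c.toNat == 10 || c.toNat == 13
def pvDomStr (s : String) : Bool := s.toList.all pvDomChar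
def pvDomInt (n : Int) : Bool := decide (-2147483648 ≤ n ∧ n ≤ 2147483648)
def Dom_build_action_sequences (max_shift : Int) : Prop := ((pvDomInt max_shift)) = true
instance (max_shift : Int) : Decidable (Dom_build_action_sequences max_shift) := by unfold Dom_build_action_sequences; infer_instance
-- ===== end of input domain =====

-- B builds the distinct shift blocks once (one empty block for k = 0) and combines them
-- with each rotation prefix in a single pass, removing A's duplicate generation and dedup pass.

-- ===== PORT A =====
def build_action_sequences (max_shift : Int) : List (List Int) :=
  let rotations : List (List Int) := [[], [3], [3, 3], [3, 3, 3]]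
  let sequences : List (List Int) :=
    rotations.foldl (fun acc rot =>
      (PySem.List.pyRange 0 (max_shift + 1) 1).foldl (fun acc2 k =>
        acc2 ++ [rot ++ List.replicate k.toNat 0 ++ [5],
                 rot ++ List.replicate k.toNat 1 ++ [5]]) acc) []
  let p :=
    sequences.foldl (fun (p : List (List Int) × PySem.Set (List Int)) seq =>
      if p.2.contains seq then p else (p.1 ++ [seq], p.2.add seq))
      ([], PySem.Set.empty)
  p.1

-- ===== PORT B =====
def build_action_sequences_alt (max_shift : Int) : List (List Int) :=
  let shift_blocks : List (List Int) :=
    (PySem.List.pyRange 0 (max_shift + 1) 1).foldl (fun acc k =>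
      if k == 0 then acc ++ [[]]
      else acc ++ [List.replicate k.toNat 0, List.replicate k.toNat 1]) []
  ([[], [3], [3, 3], [3, 3, 3]] : List (List Int)).flatMap (fun rot =>
    shift_blocks.map (fun block => rot ++ block ++ [5]))

-- ===== PRECONDITION & SPEC =====
def Spec_build_action_sequences (max_shift : Int) (out : List (List Int)) : Prop := out = build_action_sequences_alt max_shift
instance (max_shift : Int) (out : List (List Int)) : Decidable (Spec_build_action_sequences max_shift out) := by unfold Spec_build_action_sequences; infer_instance

-- ===== CLAIM (what is proved, stated in full; the proofs are below) =====
def Claim_equal_build_action_sequences : Prop := ∀ (max_shift : Int), Dom_build_action_sequences max_shift → Spec_build_action_sequences max_shift (build_action_sequences max_shift)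

-- ===== LEMMAS AND PROOFS =====

-- element: r rotations, then k shifts in direction d, then hard drop
def pvElt (r : Nat) (d : Int) (k : Nat) : List Int :=
  List.replicate r 3 ++ List.replicate k d ++ [5]

-- tail segment (k >= 1) of the unique sequences for one rotation prefix
def pvSeg (r j : Nat) : List (List Int) :=
  (List.range j).flatMap (fun k => [pvElt r 0 (k+1), pvElt r 1 (k+1)])

-- unique sequences for one rotation prefix (range of j+1 shift counts)
def pvU (r j : Nat) : List (List Int) := pvElt r 0 0 :: pvSeg r j

-- A's raw per-rotation sequence list
def pvS (r n : Nat) : List (List Int) :=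
  (List.range n).flatMap (fun k => [pvElt r 0 k, pvElt r 1 k])

lemma repl3_inj : ∀ (r r' : Nat) (x y : Int) (t t' : List Int), x ≠ 3 → y ≠ 3 →
    List.replicate r (3:Int) ++ x :: t = List.replicate r' 3 ++ y :: t' →
    r = r' ∧ x = y ∧ t = t' := by
  intro r
  induction r with
  | zero =>
    intro r' x y t t' hx hy h
    cases r' with
    | zero => simpa using h
    | succ r' =>
      rw [List.replicate_succ] at h
      simp at h
      exact absurd h.1 hx
  | succ r ih =>
    intro r' x y t t' hx hy h
    cases r' with
    | zero =>
      rw [List.replicate_succ] at h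
      simp at h
      exact absurd h.1.symm hy
    | succ r' =>
      rw [List.replicate_succ, List.replicate_succ] at h
      simp only [List.cons_append, List.cons.injEq] at h
      obtain ⟨hr, hxy, ht⟩ := ih r' x y t t' hx hy h.2
      exact ⟨by omega, hxy, ht⟩

lemma pvElt_succ_shape (r : Nat) (d : Int) (k : Nat) :
    pvElt r d (k+1) = List.replicate r 3 ++ d :: (List.replicate k d ++ [5]) := by
  simp [pvElt, List.replicate_succ]

lemma pvElt_zero_shape (r : Nat) (d : Int) :
    pvElt r d 0 = List.replicate r 3 ++ (5:Int) :: [] := by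
  show List.replicate r 3 ++ List.replicate 0 d ++ [5] = _
  simp

lemma pvElt_ne_of_ne_r (r r' : Nat) (h : r ≠ r') (d d' : Int) (k k' : Nat)
    (hd : d = 0 ∨ d = 1) (hd' : d' = 0 ∨ d' = 1) : pvElt r d k ≠ pvElt r' d' k' := by
  have hd3 : d ≠ 3 := by rcases hd with rfl | rfl <;> decide
  have hd3' : d' ≠ 3 := by rcases hd' with rfl | rfl <;> decide
  intro he
  cases k with
  | zero =>
    cases k' with
    | zero =>
      rw [pvElt_zero_shape, pvElt_zero_shape] at he
      exact h (repl3_inj r r' 5 5 [] [] (by decide) (by decide) he).1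
    | succ k' =>
      rw [pvElt_zero_shape, pvElt_succ_shape] at he
      exact h (repl3_inj _ _ _ _ _ _ (by decide) hd3' he).1
  | succ k =>
    cases k' with
    | zero =>
      rw [pvElt_succ_shape, pvElt_zero_shape] at he
      exact h (repl3_inj _ _ _ _ _ _ hd3 (by decide) he).1
    | succ k' =>
      rw [pvElt_succ_shape, pvElt_succ_shape] at he
      exact h (repl3_inj _ _ _ _ _ _ hd3 hd3' he).1

lemma pvElt_zero_ne_succ (r r' : Nat) (d : Int) (k : Nat) (hd : d = 0 ∨ d = 1) :
    pvElt r 0 0 ≠ pvElt r' d (k+1) := by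
  have hd3 : d ≠ 3 := by rcases hd with rfl | rfl <;> decide
  intro he
  rw [pvElt_zero_shape, pvElt_succ_shape] at he
  have := (repl3_inj _ _ _ _ _ _ (by decide) hd3 he).2.1
  rcases hd with rfl | rfl <;> simp at this

lemma pvElt_succ_inj (r : Nat) (d d' : Int) (k k' : Nat)
    (hd : d = 0 ∨ d = 1) (hd' : d' = 0 ∨ d' = 1)
    (h : pvElt r d (k+1) = pvElt r d' (k'+1)) : d = d' ∧ k = k' := by
  have hd3 : d ≠ 3 := by rcases hd with rfl | rfl <;> decide
  have hd3' : d' ≠ 3 := by rcases hd' with rfl | rfl <;> decide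
  rw [pvElt_succ_shape, pvElt_succ_shape] at h
  obtain ⟨-, hde, hte⟩ := repl3_inj _ _ _ _ _ _ hd3 hd3' h
  refine ⟨hde, ?_⟩
  have := congrArg List.length hte
  simp at this
  omega

lemma mem_pvSeg {x : List Int} {r j : Nat} :
    x ∈ pvSeg r j ↔ ∃ k, k < j ∧ (x = pvElt r 0 (k+1) ∨ x = pvElt r 1 (k+1)) := by
  simp [pvSeg, List.mem_flatMap]

lemma pvSeg_succ (r j : Nat) :
    pvSeg r (j+1) = pvSeg r j ++ [pvElt r 0 (j+1), pvElt r 1 (j+1)] := by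
  simp [pvSeg, List.range_succ]

lemma nodup_pvSeg (r j : Nat) : (pvSeg r j).Nodup := by
  induction j with
  | zero => simp [pvSeg]
  | succ j ih =>
    rw [pvSeg_succ, List.nodup_append]
    refine ⟨ih, ?_, ?_⟩
    · simp only [List.nodup_cons, List.not_mem_nil, not_false_eq_true,
        List.nodup_nil, and_true, List.mem_cons, or_false]
      intro he
      exact absurd (pvElt_succ_inj r 0 1 j j (Or.inl rfl) (Or.inr rfl) he).1 (by decide)
    · intro a ha b hb
      obtain ⟨k, hk, hak⟩ := mem_pvSeg.1 ha
      have hb' : b = pvElt r 0 (j+1) ∨ b = pvElt r 1 (j+1) := by simpa using hb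
      rcases hak with rfl | rfl <;> rcases hb' with rfl | rfl <;> intro he <;>
        · have := pvElt_succ_inj r _ _ _ _ (by simp) (by simp) he
          omega

lemma mem_pvU_imp {x : List Int} {r j : Nat} (h : x ∈ pvU r j) :
    ∃ d k, (d = (0:Int) ∨ d = 1) ∧ x = pvElt r d k := by
  rcases List.mem_cons.1 h with rfl | h
  · exact ⟨0, 0, Or.inl rfl, rfl⟩
  · obtain ⟨k, -, hk⟩ := mem_pvSeg.1 h
    rcases hk with rfl | rfl
    · exact ⟨0, k+1, Or.inl rfl, rfl⟩
    · exact ⟨1, k+1, Or.inr rfl, rfl⟩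

lemma pvU_disjoint {r r' j : Nat} (h : r ≠ r') {y : List Int}
    (hy : y ∈ pvU r j) (hy' : y ∈ pvU r' j) : False := by
  obtain ⟨d, k, hd, rfl⟩ := mem_pvU_imp hy
  obtain ⟨d', k', hd', he⟩ := mem_pvU_imp hy'
  exact pvElt_ne_of_ne_r r r' h d d' k k' hd hd' he

lemma set_add_of_not_mem {s : List (List Int)} {x : List Int} (h : x ∉ s) :
    PySem.Set.add s x = s ++ [x] := by
  simp [PySem.Set.add, h]

lemma set_add_of_mem {s : List (List Int)} {x : List Int} (h : x ∈ s) :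
    PySem.Set.add s x = s := by
  simp [PySem.Set.add, h]

lemma foldl_add_fresh : ∀ (ys s : List (List Int)), ys.Nodup → (∀ y ∈ ys, y ∉ s) →
    List.foldl PySem.Set.add s ys = s ++ ys := by
  intro ys
  induction ys with
  | nil => intro s _ _; simp
  | cons y ys ih =>
    intro s hnd hf
    rw [List.foldl_cons, set_add_of_not_mem (hf y (by simp))]
    rw [ih (s ++ [y]) (List.nodup_cons.1 hnd).2]
    · simp
    · intro z hz
      simp only [List.mem_append, List.mem_singleton]
      rintro (hzs | rfl)
      · exact hf z (by simp [hz]) hzs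
      · exact (List.nodup_cons.1 hnd).1 hz

lemma pvS_succ_head (r j : Nat) :
    pvS r (j+1) = pvElt r 0 0 :: pvElt r 1 0 :: pvSeg r j := by
  rw [pvS, List.range_succ_eq_map]
  simp only [List.flatMap_cons, List.flatMap_map]
  rfl

lemma pvElt_one_zero (r : Nat) : pvElt r 1 0 = pvElt r 0 0 := by
  simp [pvElt]

lemma foldl_add_pvS (r j : Nat) (s : List (List Int)) (hfresh : ∀ y ∈ pvU r j, y ∉ s) :
    List.foldl PySem.Set.add s (pvS r (j+1)) = s ++ pvU r j := by
  have h0 : pvElt r 0 0 ∉ s := hfresh _ (by simp [pvU])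
  rw [pvS_succ_head, List.foldl_cons, List.foldl_cons, set_add_of_not_mem h0,
    pvElt_one_zero, set_add_of_mem (by simp)]
  rw [foldl_add_fresh _ _ (nodup_pvSeg r j) ?fresh]
  · simp [pvU]
  case fresh =>
    intro y hy
    have hyU : y ∈ pvU r j := by simp [pvU, hy]
    simp only [List.mem_append, List.mem_singleton]
    rintro (hys | rfl)
    · exact hfresh y hyU hys
    · obtain ⟨k, -, hk⟩ := mem_pvSeg.1 hy
      rcases hk with hk | hk
      · exact pvElt_zero_ne_succ r r 0 k (Or.inl rfl) hk
      · exact pvElt_zero_ne_succ r r 1 k (Or.inr rfl) hk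

lemma dedup_pair : ∀ (xs u : List (List Int)),
    (xs.foldl (fun (p : List (List Int) × PySem.Set (List Int)) seq =>
      if p.2.contains seq then p else (p.1 ++ [seq], p.2.add seq)) (u, u)).1
    = xs.foldl PySem.Set.add u := by
  intro xs
  induction xs with
  | nil => intro u; rfl
  | cons x xs ih =>
    intro u
    rw [List.foldl_cons, List.foldl_cons]
    by_cases hx : x ∈ u
    · have hc : PySem.Set.contains u x = true := by
        simpa [PySem.Set.contains] using hx
      rw [if_pos hc, set_add_of_mem hx]
      exact ih u
    · have hc : ¬ (PySem.Set.contains u x = true) := by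
        simpa [PySem.Set.contains] using hx
      rw [if_neg hc]
      simp only [PySem.Set.add, hc, Bool.false_eq_true]
      exact ih (u ++ [x])

-- A's per-rotation inner fold, for max_shift + 1 = j + 1
lemma A_inner (j r : Nat) (rot : List Int) (hrot : rot = List.replicate r 3)
    (acc : List (List Int)) :
    (List.map (fun k : Nat => (k : Int)) (List.range (j+1))).foldl (fun acc2 k =>
        acc2 ++ [rot ++ List.replicate k.toNat 0 ++ [5],
                 rot ++ List.replicate k.toNat 1 ++ [5]]) acc
      = acc ++ pvS r (j+1) := by
  subst hrot
  rw [PySem.List.foldl_append_eq_flatMap]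
  congr 1
  rw [List.flatMap_map]
  simp only [pvS, pvElt, Int.toNat_natCast]

lemma B_blocks (j : Nat) :
    (List.map (fun k : Nat => (k : Int)) (List.range (j+1))).foldl (fun acc k =>
        if k == 0 then acc ++ [[]]
        else acc ++ [List.replicate k.toNat 0, List.replicate k.toNat 1]) []
      = [] :: (List.range j).flatMap (fun k => [List.replicate (k+1) (0:Int), List.replicate (k+1) 1]) := by
  induction j with
  | zero => simp
  | succ j ih =>
    rw [show List.range (j+1+1) = List.range (j+1) ++ [j+1] from List.range_succ,
      List.map_append, List.foldl_append, ih]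
    simp [List.range_succ]
    omega

lemma map_blocks (r : Nat) (rot : List Int) (hrot : rot = List.replicate r 3) (j : Nat) :
    ([] :: (List.range j).flatMap (fun k => [List.replicate (k+1) (0:Int), List.replicate (k+1) 1])).map
        (fun b => rot ++ b ++ [5]) = pvU r j := by
  subst hrot
  simp [pvU, pvSeg, pvElt, List.map_flatMap]

lemma main_nonneg (j : Nat) :
    build_action_sequences ((j : Int)) = build_action_sequences_alt ((j : Int)) := by
  have hcast : ((j : Int) + 1) = ((j + 1 : Nat) : Int) := by push_cast; ring
  have hrange : PySem.List.pyRange 0 ((j : Int) + 1) 1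
      = List.map (fun k : Nat => (k : Int)) (List.range (j+1)) := by
    rw [hcast]; exact PySem.List.pyRange_zero_natCast (j+1)
  unfold build_action_sequences build_action_sequences_alt
  rw [hrange]
  simp only [List.foldl_cons, List.foldl_nil]
  rw [A_inner j 0 [] rfl, A_inner j 1 [3] rfl, A_inner j 2 [3, 3] rfl,
    A_inner j 3 [3, 3, 3] rfl, B_blocks j]
  have hempty : (PySem.Set.empty : PySem.Set (List Int)) = ([] : List (List Int)) := rfl
  rw [hempty, dedup_pair]
  simp only [List.nil_append, List.foldl_append]
  rw [foldl_add_pvS 0 j [] (by simp),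
      foldl_add_pvS 1 j _ (by
        simp only [List.nil_append]
        intro y hy h'
        exact pvU_disjoint (by decide) hy h'),
      foldl_add_pvS 2 j _ (by
        intro y hy h'
        simp only [List.nil_append, List.mem_append] at h'
        rcases h' with h' | h'
        · exact pvU_disjoint (by decide) hy h'
        · exact pvU_disjoint (by decide) hy h'),
      foldl_add_pvS 3 j _ (by
        intro y hy h'
        simp only [List.nil_append, List.mem_append] at h'
        rcases h' with (h' | h') | h'
        · exact pvU_disjoint (by decide) hy h'
        · exact pvU_disjoint (by decide) hy h'
        · exact pvU_disjoint (by decide) hy h')]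
  simp only [List.flatMap_cons, List.flatMap_nil, List.append_nil, List.nil_append]
  have m0 : List.map (fun (block : List Int) => block ++ [5])
      ([] :: (List.range j).flatMap (fun k => [List.replicate (k+1) (0:Int), List.replicate (k+1) 1]))
      = pvU 0 j := by simpa using map_blocks 0 [] rfl j
  rw [m0, map_blocks 1 [3] rfl j, map_blocks 2 [3, 3] rfl j,
    map_blocks 3 [3, 3, 3] rfl j]
  simp [List.append_assoc]

theorem build_action_sequences_main (m : Int) :
    build_action_sequences m = build_action_sequences_alt m := by
  rcases le_or_gt 0 m with h | h
  · obtain ⟨j, rfl⟩ : ∃ j : Nat, m = (j : Int) := ⟨m.toNat, by omega⟩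
    exact main_nonneg j
  · have hnil : PySem.List.pyRange 0 (m + 1) 1 = [] :=
      PySem.List.pyRange_one_eq_nil (by omega)
    unfold build_action_sequences build_action_sequences_alt
    rw [hnil]
    simp

-- ===== VERDICT (by name: the statement is the Claim_ definition above) =====
theorem build_action_sequences_spec : Claim_equal_build_action_sequences := by
  intro m _
  unfold Spec_build_action_sequences
  exact build_action_sequences_main m
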